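-- pv_equiv track=rewrite | github.com/vladtf/CodeWars-py | Project/MostValuableCharacter.py | solve
-- ===== SOURCE A (Python) =====
-- def solve(st):
--     output = min(st)
--     max_len = 0
--     for x in st:
--         if st.count(x) < 2:
--             continue
--
--         length = chr_value(st, x)
--         if length > max_len:
--             output = x
--             max_len = length
--         elif length == max_len:
--             output = chr(min(ord(x), ord(output)))
--
--     return output
--
-- def chr_value(st, x):
--     st_index = st.index(x)
--     end_index = len(st) - st[::-1].index(x) - 1
--     length = abs(st_index - end_index)
--     return length
-- ===== SOURCE B (Python) =====
-- def solve(st):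
--     # one pass: first/last occurrence index of every character, then one
--     # scan over the distinct characters in first-appearance order
--     first = {}
--     last = {}
--     for i, c in enumerate(st):
--         if c not in first:
--             first[c] = i
--         last[c] = i
--     best = min(st)
--     best_len = 0
--     for c in first:
--         span = last[c] - first[c]
--         if span > best_len:
--             best, best_len = c, span
--         elif span == best_len and c < best:
--             best = c
--     return best
-- ===== Notes on version B (the rewrite author's own statement) =====
-- stated objective: faster
-- what changed: replaces the per-character count/index/reversed-index scans (quadratic) by one pass that records each character's first and last index in dicts, then a single scan over the distinct characters in first-appearance order
import Mathlib
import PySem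

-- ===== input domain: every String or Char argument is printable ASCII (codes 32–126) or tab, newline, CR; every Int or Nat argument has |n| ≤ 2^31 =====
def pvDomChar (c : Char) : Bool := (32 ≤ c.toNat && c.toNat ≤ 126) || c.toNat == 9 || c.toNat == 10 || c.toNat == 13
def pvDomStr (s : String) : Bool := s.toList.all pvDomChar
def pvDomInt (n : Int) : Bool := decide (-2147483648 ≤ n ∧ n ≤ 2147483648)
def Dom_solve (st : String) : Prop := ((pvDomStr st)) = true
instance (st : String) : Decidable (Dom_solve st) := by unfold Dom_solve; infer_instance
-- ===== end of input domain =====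

-- B replaces A's per-character count/index/reversed-index scans (quadratic) by one pass recording
-- each character's first and last index in dicts, then one scan over the distinct characters.

-- ===== PORT A =====
-- chr_value(st, x): x is always a member of st at every call site, so the two .index calls
-- (which would raise ValueError on a non-member) are ported via index? with getD 0 (never taken).
def chr_value (l : List Char) (x : Char) : Int :=
  let st_index : Int := ((PySem.List.index? l x).getD 0 : Nat)
  let rev : List Char := (PySem.List.slice? l none none (-1)).getD []
  let end_index : Int := PySem.List.len l - ((PySem.List.index? rev x).getD 0 : Nat) - 1
  |st_index - end_index|

def solve (st : String) : String :=
  let l := st.toList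
  match PySem.List.min? l (fun c => c) with
  | none => ""   -- Python: min('') raises ValueError; excluded by Pre_solve
  | some m0 =>
    let r := l.foldl (fun (s : Char × Int) x =>
        if PySem.List.count l x < 2 then s
        else
          let length := chr_value l x
          if length > s.2 then (x, length)
          else if length = s.2 then (Char.ofNat (min x.toNat s.1.toNat), s.2)
          else s) (m0, 0)
    String.ofList [r.1]

-- ===== PORT B =====
def solve_alt (st : String) : String :=
  let l := st.toList
  let fl := (PySem.List.enumerate l 0).foldl
      (fun (fl : PySem.Dict Char Int × PySem.Dict Char Int) ic =>
        (if fl.1.contains ic.2 then fl.1 else fl.1.insert ic.2 ic.1,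
         fl.2.insert ic.2 ic.1))
      (PySem.Dict.empty, PySem.Dict.empty)
  match PySem.List.min? l (fun c => c) with
  | none => ""   -- Python: min('') raises ValueError; excluded by Pre_solve
  | some m0 =>
    let r := (PySem.Dict.keys fl.1).foldl (fun (s : Char × Int) c =>
        let span := fl.2.getD c 0 - fl.1.getD c 0
        if span > s.2 then (c, span)
        else if span = s.2 ∧ c < s.1 then (c, s.2)
        else s) (m0, 0)
    String.ofList [r.1]

-- ===== PRECONDITION & SPEC =====
-- Python A raises ValueError (min of empty sequence) on the empty string; B raises there too.
def Pre_solve (st : String) : Prop := st ≠ ""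
instance (st : String) : Decidable (Pre_solve st) := by unfold Pre_solve; infer_instance
def pvWitness_solve : String := "abcba"

def Spec_solve (st : String) (out : String) : Prop := out = solve_alt st
instance (st : String) (out : String) : Decidable (Spec_solve st out) := by unfold Spec_solve; infer_instance

-- ===== CLAIM (what is proved, stated in full; the proofs are below) =====
def Claim_equal_solve : Prop := ∀ (st : String), Dom_solve st → Pre_solve st → Spec_solve st (solve st)

-- ===== LEMMAS AND PROOFS =====

def fi (c : Char) : List Char → Nat
  | [] => 0
  | a :: t => if a = c then 0 else fi c t + 1
def li (c : Char) : List Char → Nat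
  | [] => 0
  | _ :: t => if c ∈ t then li c t + 1 else 0

lemma fi_lt {c : Char} {l : List Char} (hc : c ∈ l) : fi c l < l.length := by
  induction l with
  | nil => simp at hc
  | cons a t ih =>
    by_cases h : a = c
    · simp [fi, h]
    · have : c ∈ t := (List.mem_cons.mp hc).resolve_left (fun h' => h h'.symm)
      simp [fi, h, Nat.succ_lt_succ (ih this)]

lemma getElem_fi {c : Char} {l : List Char} (hc : c ∈ l) : l[fi c l]'(fi_lt hc) = c := by
  induction l with
  | nil => simp at hc
  | cons a t ih =>
    by_cases h : a = c
    · simp [fi, h]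
    · have hct : c ∈ t := (List.mem_cons.mp hc).resolve_left (fun h' => h h'.symm)
      simp [fi, h, ih hct]

lemma fi_min {c : Char} {l : List Char} {j : Nat} (hj : j < l.length) (h : j < fi c l) :
    l[j] ≠ c := by
  induction l generalizing j with
  | nil => simp at hj
  | cons a t ih =>
    by_cases ha : a = c
    · simp [fi, ha] at h
    · cases j with
      | zero => simpa using ha
      | succ j =>
        simp [fi, ha] at h
        simpa using ih (by simpa using hj) h

lemma li_lt {c : Char} {l : List Char} (hc : c ∈ l) : li c l < l.length := by
  induction l with
  | nil => simp at hc
  | cons a t ih =>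
    by_cases h : c ∈ t
    · simp [li, h, Nat.succ_lt_succ (ih h)]
    · simp [li, h]

lemma getElem_li {c : Char} {l : List Char} (hc : c ∈ l) : l[li c l]'(li_lt hc) = c := by
  induction l with
  | nil => simp at hc
  | cons a t ih =>
    by_cases h : c ∈ t
    · simp [li, h, ih h]
    · have : a = c := ((List.mem_cons.mp hc).resolve_right h).symm
      simp [li, h, this]

lemma li_max {c : Char} {l : List Char} {j : Nat} (hj : j < l.length) (h : li c l < j) :
    l[j] ≠ c := by
  induction l generalizing j with
  | nil => simp at hj
  | cons a t ih =>
    cases j with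
    | zero => omega
    | succ j =>
      by_cases hct : c ∈ t
      · simp [li, hct] at h
        simpa using ih (by simpa using hj) h
      · intro he
        exact hct (by simp at he; exact he ▸ List.getElem_mem _)

lemma fi_le_li {c : Char} {l : List Char} (hc : c ∈ l) : fi c l ≤ li c l := by
  by_contra h
  exact fi_min (li_lt hc) (by omega) (getElem_li hc)

lemma index?_fi {c : Char} {l : List Char} (hc : c ∈ l) :
    PySem.List.index? l c = some (fi c l) := by
  induction l with
  | nil => simp at hc
  | cons a t ih =>
    by_cases h : a = c
    · subst h; rw [PySem.List.index?_cons_self]; simp [fi]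
    · have hct : c ∈ t := (List.mem_cons.mp hc).resolve_left (fun h' => h h'.symm)
      rw [PySem.List.index?_cons_of_ne t h, ih hct]
      simp [fi, h]

lemma count_ge2_iff {c : Char} {l : List Char} (hc : c ∈ l) :
    2 ≤ l.count c ↔ fi c l < li c l := by
  have hfl := fi_lt hc
  have hdrop : l.drop (fi c l) = c :: l.drop (fi c l + 1) := by
    rw [List.drop_eq_getElem_cons hfl, getElem_fi hc]
  have hsplit : l = l.take (fi c l) ++ (c :: l.drop (fi c l + 1)) := by
    rw [← hdrop, List.take_append_drop]
  have htake : (l.take (fi c l)).count c = 0 := by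
    rw [List.count_eq_zero]
    intro hmem
    obtain ⟨j, hj, hje⟩ := List.getElem_of_mem hmem
    have hj' : j < fi c l := by have := List.length_take (l := l) (i := fi c l); omega
    exact fi_min (by omega) hj' (by simpa [List.getElem_take] using hje)
  have hcnt : l.count c = 1 + (l.drop (fi c l + 1)).count c := by
    conv_lhs => rw [hsplit]
    simp [List.count_append, htake]; omega
  constructor
  · intro h2
    have h1 : 1 ≤ (l.drop (fi c l + 1)).count c := by omega
    have hmem : c ∈ l.drop (fi c l + 1) := List.count_pos_iff.mp (by omega)
    obtain ⟨j, hj, hje⟩ := List.getElem_of_mem hmem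
    have hlen : fi c l + 1 + j < l.length := by
      have := List.length_drop (l := l) (i := fi c l + 1); omega
    have hocc : l[fi c l + 1 + j]'hlen = c := by
      rw [← List.getElem_drop]; exact hje
    have : ¬ (li c l < fi c l + 1 + j) := fun hgt => li_max hlen hgt hocc
    omega
  · intro hlt
    have hll := li_lt hc
    have hj : li c l - (fi c l + 1) < (l.drop (fi c l + 1)).length := by
      have := List.length_drop (l := l) (i := fi c l + 1); omega
    have hocc : (l.drop (fi c l + 1))[li c l - (fi c l + 1)]'hj = c := by
      rw [List.getElem_drop]
      have he : fi c l + 1 + (li c l - (fi c l + 1)) = li c l := by omega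
      simp only [he]; exact getElem_li hc
    have hmem : c ∈ l.drop (fi c l + 1) := List.mem_iff_getElem.mpr ⟨_, hj, hocc⟩
    have h1 : 1 ≤ (l.drop (fi c l + 1)).count c := List.count_pos_iff.mpr hmem
    omega

lemma rev_index? {c : Char} {l : List Char} (hc : c ∈ l) :
    PySem.List.index? l.reverse c = some (l.length - 1 - li c l) := by
  have hmemr : c ∈ l.reverse := List.mem_reverse.mpr hc
  obtain ⟨k, hk⟩ := Option.isSome_iff_exists.mp ((PySem.List.index?_isSome_iff _ _).mpr hmemr)
  obtain ⟨hklen, hget, hmin⟩ := PySem.List.getElem_of_index?_eq_some hk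
  have hll := li_lt hc
  have hklen' : k < l.length := by simpa using hklen
  have hocc : l[l.length - 1 - k]'(by omega) = c := by
    rw [← List.getElem_reverse (by simpa using hklen')]
    exact hget
  have h1 : l.length - 1 - k ≤ li c l := by
    by_contra hgt
    exact li_max (by omega) (by omega) hocc
  have h2 : ¬ (l.length - 1 - li c l < k) := by
    intro hlt
    have hx := hmin (l.length - 1 - li c l) hlt
    rw [List.getElem_reverse] at hx
    exact hx (by
      have he : l.length - 1 - (l.length - 1 - li c l) = li c l := by omega
      simpa [he] using getElem_li hc)
  rw [hk]
  congr 1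
  omega

lemma chr_value_eq {c : Char} {l : List Char} (hc : c ∈ l) :
    chr_value l c = (li c l : Int) - (fi c l : Int) := by
  have hfl := fi_le_li hc
  have hll := li_lt hc
  unfold chr_value
  rw [index?_fi hc, PySem.List.slice?_none_none_neg_one]
  simp only [Option.getD_some]
  rw [rev_index? hc]
  simp only [Option.getD_some, PySem.List.len_eq]
  have : (l.length : Int) - ((l.length - 1 - li c l : Nat) : Int) - 1 = (li c l : Int) := by
    omega
  rw [this]
  rw [abs_of_nonpos (by omega)]
  ring

lemma minc_eq (a b : Char) : Char.ofNat (min a.toNat b.toNat) = if a < b then a else b := by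
  by_cases h : a < b
  · have : a.toNat ≤ b.toNat := by
      have := (Char.lt_def.mp h)
      exact le_of_lt (by exact_mod_cast this)
    simp [h, min_eq_left this, Char.ofNat_toNat]
  · have hle : b ≤ a := le_of_not_gt h
    have : b.toNat ≤ a.toNat := by
      have := Char.le_def.mp hle
      exact_mod_cast this
    simp [h, min_eq_right this, Char.ofNat_toNat]

def gstep (s : Char × Int) (e : Char × Int) : Char × Int :=
  if e.2 > s.2 then e
  else if e.2 = s.2 ∧ e.1 < s.1 then (e.1, s.2)
  else s

def spanOf (l : List Char) (c : Char) : Int := (li c l : Int) - (fi c l : Int)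

def evA (l : List Char) : List (Char × Int) :=
  (l.filter (fun c => decide (2 ≤ l.count c))).map (fun c => (c, spanOf l c))

lemma Afold_eq (l : List Char) (m0 : Char) :
    l.foldl (fun (s : Char × Int) x =>
        if PySem.List.count l x < 2 then s
        else
          let length := chr_value l x
          if length > s.2 then (x, length)
          else if length = s.2 then (Char.ofNat (min x.toNat s.1.toNat), s.2)
          else s) (m0, 0)
      = (evA l).foldl gstep (m0, 0) := by
  rw [PySem.List.foldl_congr_mem l _
      (fun s x => if 2 ≤ l.count x then gstep s (x, spanOf l x) else s) (m0, 0) ?_]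
  · rw [PySem.List.foldl_ite_eq_foldl_filter (fun x => 2 ≤ l.count x)
        (fun s x => gstep s (x, spanOf l x)) l (m0, 0)]
    unfold evA
    rw [List.foldl_map]
  · intro s x hx
    by_cases h2 : 2 ≤ l.count x
    · have hlt : ¬ (PySem.List.count l x < 2) := by
        simpa [PySem.List.count] using h2
      simp only [if_neg hlt, if_pos h2]
      rw [chr_value_eq hx]
      show (if spanOf l x > s.2 then (x, spanOf l x)
            else if spanOf l x = s.2 then (Char.ofNat (min x.toNat s.1.toNat), s.2)
            else s) = gstep s (x, spanOf l x)
      unfold gstep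
      by_cases hgt : spanOf l x > s.2
      · simp [hgt]
      · by_cases heq : spanOf l x = s.2
        · rw [minc_eq]
          by_cases hlt2 : x < s.1
          · simp [hgt, heq, hlt2]
          · simp [hgt, heq, hlt2]
        · simp [hgt, heq]
    · have hlt : PySem.List.count l x < 2 := by
        simpa [PySem.List.count] using h2
      simp only [if_pos hlt, if_neg h2]

lemma firstD_get? (t : List Char) (k : Int) (d : PySem.Dict Char Int) (c : Char) :
    ((PySem.List.enumerate t k).foldl
        (fun d ic => if d.contains ic.2 then d else d.insert ic.2 ic.1) d).get? c
      = if c ∈ t ∧ d.contains c = false then some (k + (fi c t : Int)) else d.get? c := by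
  induction t generalizing k d with
  | nil => simp [PySem.List.enumerate_nil]
  | cons a t ih =>
    rw [PySem.List.enumerate_cons, List.foldl_cons, ih]
    by_cases hca : c = a
    · subst hca
      by_cases hda : d.contains c
      · simp [hda, fi]
      · simp only [Bool.not_eq_true] at hda
        have h1 : (d.insert c k).contains c = true := PySem.Dict.contains_insert_self d c k
        simp [hda, h1, PySem.Dict.get?_insert_self, fi]
    · have hne : ¬ a = c := fun h => hca h.symm
      have hfi : fi c (a :: t) = fi c t + 1 := by simp [fi, hne]
      have hd' : ((if d.contains a then d else d.insert a k).contains c) = d.contains c := by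
        by_cases hda : d.contains a
        · simp [hda]
        · simp only [Bool.not_eq_true] at hda
          simp only [hda, Bool.false_eq_true, if_false]
          rw [PySem.Dict.contains_insert]
          simp [hca]
      have hg' : ((if d.contains a then d else d.insert a k).get? c) = d.get? c := by
        by_cases hda : d.contains a
        · simp [hda]
        · simp only [Bool.not_eq_true] at hda
          simp only [hda, Bool.false_eq_true, if_false]
          exact PySem.Dict.get?_insert_of_ne d k hca
      rw [hd', hg', hfi]
      by_cases hct : c ∈ t
      · simp only [List.mem_cons, hct, or_true, true_and, hca, false_or]
        split_ifs with h
        · congr 1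
          push_cast
          ring
        · rfl
      · simp [hct, hca]

lemma lastD_get? (t : List Char) (k : Int) (d : PySem.Dict Char Int) (c : Char) :
    ((PySem.List.enumerate t k).foldl (fun d ic => d.insert ic.2 ic.1) d).get? c
      = if c ∈ t then some (k + (li c t : Int)) else d.get? c := by
  induction t generalizing k d with
  | nil => simp [PySem.List.enumerate_nil]
  | cons a t ih =>
    rw [PySem.List.enumerate_cons, List.foldl_cons, ih]
    by_cases hct : c ∈ t
    · simp [hct, li]
      push_cast
      ring
    · by_cases hca : c = a
      · subst hca
        simp [hct, li, PySem.Dict.get?_insert_self]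
      · simp [hct, hca, PySem.Dict.get?_insert_of_ne d k hca]

lemma firstD_keys (t : List Char) (k : Int) (d : PySem.Dict Char Int) :
    ((PySem.List.enumerate t k).foldl
        (fun d ic => if d.contains ic.2 then d else d.insert ic.2 ic.1) d).keys
      = PySem.Set.update d.keys t := by
  induction t generalizing k d with
  | nil => simp [PySem.List.enumerate_nil, PySem.Set.update]
  | cons a t ih =>
    rw [PySem.List.enumerate_cons, List.foldl_cons, ih]
    have hupd : PySem.Set.update d.keys (a :: t) = PySem.Set.update (PySem.Set.add d.keys a) t := rfl
    rw [hupd]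
    by_cases hda : d.contains a
    · simp only [hda, if_true]
      congr 1
      unfold PySem.Set.add
      have hsc : PySem.Set.contains d.keys a = true :=
        List.elem_eq_true_of_mem ((PySem.Dict.contains_iff_mem_keys d a).mp hda)
      rw [hsc]
      simp
    · simp only [Bool.not_eq_true] at hda
      simp only [hda, Bool.false_eq_true, if_false]
      congr 1
      rw [PySem.Dict.keys_insert_of_not_contains d k hda]
      unfold PySem.Set.add
      have hsc : PySem.Set.contains d.keys a = false := by
        rw [Bool.eq_false_iff]
        intro hcon
        have hmem : a ∈ d.keys := by simpa [PySem.Set.contains] using hcon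
        rw [← PySem.Dict.contains_iff_mem_keys] at hmem
        simp [hmem] at hda
      rw [hsc]
      simp

def mfold (m : Int) (E : List (Char × Int)) : Int := E.foldl (fun m e => max m e.2) m
def tops (E : List (Char × Int)) (v : Int) : List Char :=
  (E.filter (fun e => decide (e.2 = v))).map Prod.fst
def lmin (b : Char) (cs : List Char) : Char := cs.foldl (fun b c => if c < b then c else b) b

lemma gstep_hi {b c : Char} {m s : Int} (h : s > m) : gstep (b, m) (c, s) = (c, s) := by
  unfold gstep; simp [h]
lemma gstep_tie {b c : Char} {m s : Int} (h1 : ¬ s > m) (h2 : s = m ∧ c < b) :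
    gstep (b, m) (c, s) = (c, m) := by
  unfold gstep; simp only [if_neg h1, if_pos h2]
lemma gstep_lo {b c : Char} {m s : Int} (h1 : ¬ s > m) (h2 : ¬ (s = m ∧ c < b)) :
    gstep (b, m) (c, s) = (b, m) := by
  unfold gstep; simp only [if_neg h1, if_neg h2]

lemma mfold_cons (c : Char) (s : Int) (t : List (Char × Int)) (m : Int) :
    mfold m ((c, s) :: t) = mfold (max m s) t := by simp [mfold]

lemma mfold_le (E : List (Char × Int)) (m : Int) : m ≤ mfold m E := by
  induction E generalizing m with
  | nil => simp [mfold]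
  | cons e t ih =>
    simp only [mfold, List.foldl_cons]
    exact le_trans (le_max_left m e.2) (ih (max m e.2))

lemma mfold_bound {E : List (Char × Int)} {e : Char × Int} (he : e ∈ E) (m : Int) :
    e.2 ≤ mfold m E := by
  induction E generalizing m with
  | nil => simp at he
  | cons a t ih =>
    simp only [mfold, List.foldl_cons]
    rcases List.mem_cons.mp he with h | h
    · subst h
      exact le_trans (le_max_right m e.2) (mfold_le t _)
    · exact ih h _

lemma mfold_attain (E : List (Char × Int)) (m : Int) :
    mfold m E = m ∨ ∃ e ∈ E, e.2 = mfold m E := by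
  induction E generalizing m with
  | nil => left; simp [mfold]
  | cons a t ih =>
    obtain ⟨c, s⟩ := a
    rw [mfold_cons]
    rcases ih (max m s) with h | ⟨e, he, hev⟩
    · by_cases hm : s ≤ m
      · left; rw [h, max_eq_left hm]
      · right
        exact ⟨(c, s), List.mem_cons_self .., by rw [h, max_eq_right (by omega)]⟩
    · right
      exact ⟨e, List.mem_cons_of_mem _ he, hev⟩

lemma tops_cons (c : Char) (s : Int) (t : List (Char × Int)) (v : Int) :
    tops ((c, s) :: t) v = if s = v then c :: tops t v else tops t v := by
  by_cases h : s = v <;> simp [tops, h]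

lemma gfold_fst (E : List (Char × Int)) (b : Char) (m : Int) :
    (mfold m E = m → (E.foldl gstep (b, m)).1 = lmin b (tops E m)) ∧
    (m < mfold m E → ∀ c0 cs0, tops E (mfold m E) = c0 :: cs0 →
        (E.foldl gstep (b, m)).1 = lmin c0 cs0) := by
  induction E generalizing b m with
  | nil =>
    constructor
    · intro _; simp [tops, lmin]
    · intro h; simp [mfold] at h
  | cons e t ih =>
    obtain ⟨c, s⟩ := e
    rw [mfold_cons]
    constructor
    · -- no strict increase overall
      intro heq
      have hsm : s ≤ m := by
        have h1 := mfold_le t (max m s)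
        have h2 := le_max_right m s
        omega
      have hmax : max m s = m := max_eq_left hsm
      rw [hmax] at heq
      rw [List.foldl_cons, tops_cons]
      by_cases h3 : s = m
      · rw [if_pos h3]
        by_cases h2 : c < b
        · rw [gstep_tie (by omega) ⟨h3, h2⟩, (ih c m).1 heq]
          show lmin c (tops t m) = lmin (if c < b then c else b) (tops t m)
          rw [if_pos h2]
        · rw [gstep_lo (by omega) (fun h => h2 h.2), (ih b m).1 heq]
          show lmin b (tops t m) = lmin (if c < b then c else b) (tops t m)
          rw [if_neg h2]
      · rw [if_neg h3, gstep_lo (by omega) (fun h => h3 h.1)]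
        exact (ih b m).1 heq
    · -- strict increase
      intro hlt c0 cs0 htop
      rw [List.foldl_cons]
      by_cases h1 : s > m
      · rw [gstep_hi h1]
        have hmax : max m s = s := max_eq_right (le_of_lt h1)
        rw [hmax] at hlt htop
        rcases eq_or_lt_of_le (mfold_le t s) with hcase | hcase
        · -- mfold s t = s
          rw [← hcase, tops_cons, if_pos rfl] at htop
          injection htop with he1 he2
          rw [← he1, ← he2]
          exact (ih c s).1 hcase.symm
        · -- s < mfold s t
          rw [tops_cons, if_neg (by omega)] at htop
          exact (ih c s).2 hcase c0 cs0 htop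
      · have hmax : max m s = m := max_eq_left (by omega)
        rw [hmax] at hlt htop
        have hsne : s ≠ mfold m t := by
          have := mfold_le t m; omega
        rw [tops_cons, if_neg hsne] at htop
        by_cases h2 : s = m ∧ c < b
        · rw [gstep_tie h1 h2]
          exact (ih c m).2 hlt c0 cs0 htop
        · rw [gstep_lo h1 h2]
          exact (ih b m).2 hlt c0 cs0 htop

lemma lmin_cons (b c : Char) (t : List Char) :
    lmin b (c :: t) = lmin (if c < b then c else b) t := rfl

lemma lmin_mem (b : Char) (cs : List Char) : lmin b cs = b ∨ lmin b cs ∈ cs := by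
  induction cs generalizing b with
  | nil => left; rfl
  | cons c t ih =>
    rw [lmin_cons]
    by_cases h : c < b
    · rw [if_pos h]
      rcases ih c with h' | h'
      · right; rw [h']; exact List.mem_cons_self ..
      · right; exact List.mem_cons_of_mem _ h'
    · rw [if_neg h]
      rcases ih b with h' | h'
      · left; exact h'
      · right; exact List.mem_cons_of_mem _ h'

lemma lmin_le (b : Char) (cs : List Char) :
    lmin b cs ≤ b ∧ ∀ x ∈ cs, lmin b cs ≤ x := by
  induction cs generalizing b with
  | nil => exact ⟨le_refl b, by simp⟩
  | cons c t ih =>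
    rw [lmin_cons]
    by_cases h : c < b
    · rw [if_pos h]
      obtain ⟨h1, h2⟩ := ih c
      refine ⟨le_trans h1 (le_of_lt h), ?_⟩
      intro x hx
      rcases List.mem_cons.mp hx with h' | h'
      · subst h'; exact h1
      · exact h2 x h'
    · rw [if_neg h]
      obtain ⟨h1, h2⟩ := ih b
      refine ⟨h1, ?_⟩
      intro x hx
      rcases List.mem_cons.mp hx with h' | h'
      · subst h'; exact le_trans h1 (le_of_not_gt h)
      · exact h2 x h'

lemma lmin_eq_self {b : Char} {cs : List Char} (h : ∀ x ∈ cs, b ≤ x) : lmin b cs = b := by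
  have h1 := (lmin_le b cs).1
  rcases lmin_mem b cs with h' | h'
  · exact h'
  · exact le_antisymm h1 (h _ h')

lemma lmin_set_eq {c0 d0 : Char} {cs ds : List Char}
    (h : ∀ x, x ∈ c0 :: cs ↔ x ∈ d0 :: ds) : lmin c0 cs = lmin d0 ds := by
  have hm1 : lmin c0 cs ∈ c0 :: cs := by
    rcases lmin_mem c0 cs with h' | h'
    · rw [h']; exact List.mem_cons_self ..
    · exact List.mem_cons_of_mem _ h'
  have hm2 : lmin d0 ds ∈ d0 :: ds := by
    rcases lmin_mem d0 ds with h' | h'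
    · rw [h']; exact List.mem_cons_self ..
    · exact List.mem_cons_of_mem _ h'
  have hle1 : ∀ x ∈ c0 :: cs, lmin c0 cs ≤ x := by
    intro x hx
    rcases List.mem_cons.mp hx with h' | h'
    · rw [h']; exact (lmin_le c0 cs).1
    · exact (lmin_le c0 cs).2 x h'
  have hle2 : ∀ x ∈ d0 :: ds, lmin d0 ds ≤ x := by
    intro x hx
    rcases List.mem_cons.mp hx with h' | h'
    · rw [h']; exact (lmin_le d0 ds).1
    · exact (lmin_le d0 ds).2 x h'
  exact le_antisymm (hle1 _ ((h _).mpr hm2)) (hle2 _ ((h _).mp hm1))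

lemma tops_map (xs : List Char) (l : List Char) (v : Int) :
    tops (xs.map (fun c => (c, spanOf l c))) v
      = xs.filter (fun c => decide (spanOf l c = v)) := by
  unfold tops
  rw [List.filter_map]
  rw [List.map_map]
  have : (Prod.fst ∘ fun c => (c, spanOf l c)) = id := rfl
  rw [this, List.map_id]
  rfl

def evD (l : List Char) : List (Char × Int) :=
  (PySem.List.dedup l).map (fun c => (c, spanOf l c))

lemma mem_tops_evA (l : List Char) (v : Int) (x : Char) :
    x ∈ tops (evA l) v ↔ x ∈ l ∧ 2 ≤ l.count x ∧ spanOf l x = v := by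
  unfold evA
  rw [tops_map]
  simp only [List.mem_filter, decide_eq_true_eq]
  tauto

lemma mem_tops_evD (l : List Char) (v : Int) (x : Char) :
    x ∈ tops (evD l) v ↔ x ∈ l ∧ spanOf l x = v := by
  unfold evD
  rw [tops_map]
  simp only [List.mem_filter, decide_eq_true_eq, PySem.List.mem_dedup]

lemma span_pos_count {l : List Char} {c : Char} (hc : c ∈ l) (h : 0 < spanOf l c) :
    2 ≤ l.count c := by
  apply (count_ge2_iff hc).mpr
  unfold spanOf at h
  omega

lemma folds_agree (l : List Char) (m0 : Char) (hm0 : ∀ y ∈ l, m0 ≤ y) :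
    ((evA l).foldl gstep (m0, 0)).1 = ((evD l).foldl gstep (m0, 0)).1 := by
  have hA_sub : ∀ e ∈ evA l, ∃ c, c ∈ l ∧ 2 ≤ l.count c ∧ e = (c, spanOf l c) := by
    intro e he
    obtain ⟨c, hc, hce⟩ := List.mem_map.mp he
    obtain ⟨hcl, hp⟩ := List.mem_filter.mp hc
    exact ⟨c, hcl, by simpa using hp, hce.symm⟩
  have hD_sub : ∀ e ∈ evD l, ∃ c, c ∈ l ∧ e = (c, spanOf l c) := by
    intro e he
    obtain ⟨c, hc, hce⟩ := List.mem_map.mp he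
    exact ⟨c, (PySem.List.mem_dedup _ _).mp hc, hce.symm⟩
  have hMA : mfold 0 (evA l) ≤ mfold 0 (evD l) := by
    rcases mfold_attain (evA l) 0 with h | ⟨e, he, hev⟩
    · rw [h]; exact mfold_le _ 0
    · obtain ⟨c, hcl, _, hce⟩ := hA_sub e he
      have hmemD : (c, spanOf l c) ∈ evD l :=
        List.mem_map.mpr ⟨c, (PySem.List.mem_dedup _ _).mpr hcl, rfl⟩
      have hb := mfold_bound hmemD 0
      rw [← hev, hce]
      simpa using hb
  have hMD : mfold 0 (evD l) ≤ mfold 0 (evA l) := by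
    rcases mfold_attain (evD l) 0 with h | ⟨e, he, hev⟩
    · rw [h]; exact mfold_le _ 0
    · obtain ⟨c, hcl, hce⟩ := hD_sub e he
      by_cases hpos : 0 < spanOf l c
      · have h2 := span_pos_count hcl hpos
        have hmemA : (c, spanOf l c) ∈ evA l :=
          List.mem_map.mpr ⟨c, List.mem_filter.mpr ⟨hcl, by simpa using h2⟩, rfl⟩
        have hb := mfold_bound hmemA 0
        rw [← hev, hce]
        simpa using hb
      · rw [← hev, hce]
        have h0 : e.2 ≤ 0 := by rw [hce]; simpa using le_of_not_gt hpos
        calc (c, spanOf l c).2 ≤ 0 := by simpa using le_of_not_gt hpos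
        _ ≤ mfold 0 (evA l) := mfold_le _ 0
  have hM : mfold 0 (evA l) = mfold 0 (evD l) := le_antisymm hMA hMD
  by_cases hz : mfold 0 (evD l) = 0
  · have hA0 : mfold 0 (evA l) = 0 := by omega
    rw [(gfold_fst (evA l) m0 0).1 hA0, (gfold_fst (evD l) m0 0).1 hz]
    have htA : tops (evA l) 0 = [] := by
      rw [List.eq_nil_iff_forall_not_mem]
      intro x hx
      obtain ⟨hxl, h2, hsp⟩ := (mem_tops_evA l 0 x).mp hx
      have := (count_ge2_iff hxl).mp h2
      unfold spanOf at hsp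
      omega
    have htD : ∀ x ∈ tops (evD l) 0, m0 ≤ x := by
      intro x hx
      exact hm0 x ((mem_tops_evD l 0 x).mp hx).1
    rw [htA, lmin_eq_self htD]
    rfl
  · have hpos : 0 < mfold 0 (evD l) := lt_of_le_of_ne (mfold_le _ 0) (Ne.symm hz)
    have hposA : 0 < mfold 0 (evA l) := by omega
    obtain ⟨e, he, hev⟩ := (mfold_attain (evD l) 0).resolve_left hz
    obtain ⟨c, hcl, hce⟩ := hD_sub e he
    have hspc : spanOf l c = mfold 0 (evD l) := by
      have := hce ▸ hev
      simpa using this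
    have hmemD : c ∈ tops (evD l) (mfold 0 (evD l)) :=
      (mem_tops_evD l _ c).mpr ⟨hcl, hspc⟩
    have hmemA : c ∈ tops (evA l) (mfold 0 (evA l)) :=
      (mem_tops_evA l _ c).mpr ⟨hcl, span_pos_count hcl (by omega), by omega⟩
    cases htaA : tops (evA l) (mfold 0 (evA l)) with
    | nil => rw [htaA] at hmemA; simp at hmemA
    | cons c0 cs0 =>
      cases htaD : tops (evD l) (mfold 0 (evD l)) with
      | nil => rw [htaD] at hmemD; simp at hmemD
      | cons d0 ds0 =>
        rw [(gfold_fst (evA l) m0 0).2 hposA c0 cs0 htaA,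
            (gfold_fst (evD l) m0 0).2 hpos d0 ds0 htaD]
        apply lmin_set_eq
        intro x
        rw [← htaA, ← htaD, mem_tops_evA, mem_tops_evD]
        constructor
        · rintro ⟨h1, _, h3⟩
          exact ⟨h1, by omega⟩
        · rintro ⟨h1, h2⟩
          exact ⟨h1, span_pos_count h1 (by omega), by omega⟩

-- ===== VERDICT (by name: the statement is the Claim_ definition above) =====
theorem solve_spec : Claim_equal_solve := by
  unfold Claim_equal_solve
  intro st _ hpre
  unfold Spec_solve solve solve_alt
  have hl : st.toList ≠ [] := by
    intro h
    exact hpre (by simpa using congrArg String.ofList h)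
  cases hmin : PySem.List.min? st.toList (fun c => c) with
  | none => exact absurd ((PySem.List.min?_eq_none_iff _ _).mp hmin) hl
  | some m0 =>
    have hm0 : ∀ y ∈ st.toList, m0 ≤ y := by
      intro y hy
      exact PySem.List.min?_isMin hmin y hy
    simp only [hmin]
    congr 1
    -- A's loop
    rw [Afold_eq st.toList m0]
    -- B's pair of dicts
    have hpair := PySem.List.foldl_prod_mk
        (fun (d : PySem.Dict Char Int) (ic : Int × Char) =>
          if d.contains ic.2 then d else d.insert ic.2 ic.1)
        (fun (d : PySem.Dict Char Int) (ic : Int × Char) => d.insert ic.2 ic.1)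
        (PySem.List.enumerate st.toList 0) PySem.Dict.empty PySem.Dict.empty
    rw [hpair]
    rw [firstD_keys st.toList 0 PySem.Dict.empty]
    have hkeys : PySem.Set.update (PySem.Dict.empty : PySem.Dict Char Int).keys st.toList
        = PySem.List.dedup st.toList := by
      rw [PySem.List.dedup_eq_ofList]
      rfl
    rw [hkeys]
    -- B's loop over the distinct characters is the event fold
    rw [PySem.List.foldl_congr_mem (PySem.List.dedup st.toList) _
        (fun s c => gstep s (c, spanOf st.toList c)) (m0, 0) ?_]
    · have hd : (PySem.List.dedup st.toList).foldl
            (fun s c => gstep s (c, spanOf st.toList c)) (m0, 0)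
          = (evD st.toList).foldl gstep (m0, 0) :=
        (List.foldl_map ..).symm
      rw [hd]
      exact congrArg (fun x => [x]) (folds_agree st.toList m0 hm0)
    · intro s c hc
      have hcl : c ∈ st.toList := (PySem.List.mem_dedup _ _).mp hc
      have hfst : ((PySem.List.enumerate st.toList 0).foldl
          (fun d ic => if PySem.Dict.contains d ic.2 then d else PySem.Dict.insert d ic.2 ic.1)
          PySem.Dict.empty).getD c 0 = (fi c st.toList : Int) := by
        rw [PySem.Dict.getD_eq_get?_getD, firstD_get?]
        simp [hcl, PySem.Dict.contains_empty]
      have hlst : ((PySem.List.enumerate st.toList 0).foldl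
          (fun d ic => PySem.Dict.insert d ic.2 ic.1)
          PySem.Dict.empty).getD c 0 = (li c st.toList : Int) := by
        rw [PySem.Dict.getD_eq_get?_getD, lastD_get?]
        simp [hcl]
      show (let span := _ - _; if span > s.2 then (c, span) else if span = s.2 ∧ c < s.1 then (c, s.2) else s) = _
      simp only [hfst, hlst]
      unfold gstep spanOf
      rfl
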